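-- pv_equiv track=rewrite | github.com/PROG1700-Fall2024/a3-p1-timesheet-dcshawen | A3-P1-Timesheet.py | setHighestHours
-- ===== SOURCE A (Python) =====
-- def setHighestHours(hours:list[int]):
--     """ Returns the highest number of hours worked in a week, and a list of the days that number was worked """
--
--     """
--         I'm keeping the loop in this time in place of the list comprehension because I have to hit those assignment outcomes somewhere
--
--         But I'd strongly rather use:
--             days = [x for x in range(1, len(hours) + 1) if hours[x - 1] == highest]
--     """
--     days = []
--     highest = max(hours)
--     for i in range(len(hours)):
--         if hours[i] == highest:
--             days.append(i + 1)
--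
--     return highest, days
-- ===== SOURCE B (Python) =====
-- def setHighestHours(hours:list[int]):
--     """ Returns the highest number of hours worked in a week, and a list of the days that number was worked """
--     highest = hours[0]
--     days = [1]
--     for day in range(2, len(hours) + 1):
--         h = hours[day - 1]
--         if h > highest:
--             highest = h
--             days = [day]
--         elif h == highest:
--             days.append(day)
--     return highest, days
-- ===== Notes on version B (the rewrite author's own statement) =====
-- stated objective: alternative
-- what changed: Single pass maintaining a running maximum and its day list simultaneously, instead of a max() pass followed by a second indexing loop; Pre_ excludes the empty list, on which both programs raise.
-- outside the precondition, e.g. on setHighestHours([]): A raises ValueError, B raises IndexError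
import Mathlib
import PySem

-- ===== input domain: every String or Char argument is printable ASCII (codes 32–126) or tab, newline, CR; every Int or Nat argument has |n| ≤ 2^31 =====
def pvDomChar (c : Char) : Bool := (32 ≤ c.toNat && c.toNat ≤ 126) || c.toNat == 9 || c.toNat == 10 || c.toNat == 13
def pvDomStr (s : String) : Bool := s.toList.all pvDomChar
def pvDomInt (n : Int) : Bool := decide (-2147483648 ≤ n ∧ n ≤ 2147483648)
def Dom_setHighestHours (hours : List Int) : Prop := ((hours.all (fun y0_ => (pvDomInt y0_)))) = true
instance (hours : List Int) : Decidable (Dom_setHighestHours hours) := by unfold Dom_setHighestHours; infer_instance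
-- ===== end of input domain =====

-- B replaces A's max() pass plus second indexing loop by ONE pass keeping a running maximum
-- and the list of days achieving it (equivalence is about the return value; neither mutates its argument).

-- ===== PORT A =====
def setHighestHours (hours : List Int) : Int × List Int :=
  -- days = []; highest = max(hours)  (max([]) raises ValueError: none-case excluded by Pre_)
  match PySem.List.max? hours (fun y => y) with
  | none => (0, [])
  | some highest =>
      let days := (PySem.List.pyRange 0 (hours.length : Int) 1).foldl
        (fun d i => if PySem.List.pyGetD hours i 0 = highest then d ++ [i + 1] else d) []
      (highest, days)

-- ===== PORT B =====
def setHighestHoursLoop (highest : Int) (days : List Int) (i : Int) : List Int → Int × List Int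
  | [] => (highest, days)
  | h :: t =>
      if highest < h then setHighestHoursLoop h [i] (i + 1) t
      else if h = highest then setHighestHoursLoop highest (days ++ [i]) (i + 1) t
      else setHighestHoursLoop highest days (i + 1) t

def setHighestHours_alt (hours : List Int) : Int × List Int :=
  -- hours[0] raises IndexError on []: excluded by Pre_
  match hours with
  | [] => (0, [])
  | h :: t => setHighestHoursLoop h [1] 2 t

-- ===== PRECONDITION & SPEC =====
-- A's max(hours) raises ValueError on the empty list (B's hours[0] raises too): excluded.
def Pre_setHighestHours (hours : List Int) : Prop := hours ≠ []
instance (hours : List Int) : Decidable (Pre_setHighestHours hours) := by unfold Pre_setHighestHours; infer_instance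
def pvWitness_setHighestHours : List Int := [3, 7, 7, 2]

def Spec_setHighestHours (hours : List Int) (out : Int × List Int) : Prop := out = setHighestHours_alt hours
instance (hours : List Int) (out : Int × List Int) : Decidable (Spec_setHighestHours hours out) := by unfold Spec_setHighestHours; infer_instance

-- ===== CLAIM (what is proved, stated in full; the proofs are below) =====
def Claim_equal_setHighestHours : Prop := ∀ (hours : List Int), Dom_setHighestHours hours → Pre_setHighestHours hours → Spec_setHighestHours hours (setHighestHours hours)

-- ===== LEMMAS AND PROOFS =====

/-- the one-based positions (starting at `i`) of the elements of the list equal to `M` -/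
def idxEq (i : Int) (M : Int) : List Int → List Int
  | [] => []
  | h :: t => if h = M then i :: idxEq (i + 1) M t else idxEq (i + 1) M t

theorem enumerate_filter_map_idxEq (xs : List Int) (s M : Int) :
    ((PySem.List.enumerate xs s).filter (fun p => decide (p.2 = M))).map (fun p => p.1 + 1)
      = idxEq (s + 1) M xs := by
  induction xs generalizing s with
  | nil => simp [PySem.List.enumerate_nil, idxEq]
  | cons h t ih =>
      simp only [PySem.List.enumerate_cons, List.filter_cons, idxEq]
      by_cases hM : h = M <;> simp [hM, ih]

theorem setHighestHoursLoop_spec (t : List Int) (H : Int) (D : List Int) (i : Int) :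
    setHighestHoursLoop H D i t
      = (t.foldl max H, (if H = t.foldl max H then D else []) ++ idxEq i (t.foldl max H) t) := by
  induction t generalizing H D i with
  | nil => simp [setHighestHoursLoop, idxEq]
  | cons h t ih =>
      simp only [setHighestHoursLoop, List.foldl_cons, idxEq]
      by_cases h1 : H < h
      · rw [if_pos h1, ih]
        have hmax : max H h = h := max_eq_right h1.le
        have hle : h ≤ t.foldl max h := (PySem.List.le_foldl_max t h).1
        simp only [hmax]
        have hne : H ≠ t.foldl max h := by omega
        rw [if_neg hne]
        by_cases h2 : h = t.foldl max h
        · rw [if_pos h2, if_pos h2]; simp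
        · rw [if_neg h2, if_neg h2]
      · rw [if_neg h1]
        have hmax : max H h = H := max_eq_left (by omega)
        by_cases h2 : h = H
        · subst h2
          rw [if_pos rfl, ih]
          simp only [hmax]
          by_cases h3 : h = t.foldl max h
          · rw [if_pos h3, if_pos h3, if_pos h3]; simp
          · rw [if_neg h3, if_neg h3, if_neg h3]
        · rw [if_neg h2, ih]
          simp only [hmax]
          have hH : h < H := lt_of_le_of_ne (by omega) h2
          have hle : H ≤ t.foldl max H := (PySem.List.le_foldl_max t H).1
          have hne : h ≠ t.foldl max H := by omega
          simp [hne]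

theorem A_days (xs : List Int) (M : Int) :
    (PySem.List.pyRange 0 (xs.length : Int) 1).foldl
        (fun d i => if PySem.List.pyGetD xs i 0 = M then d ++ [i + 1] else d) []
      = idxEq 1 M xs := by
  rw [PySem.List.foldl_append_ite (p := fun i => PySem.List.pyGetD xs i 0 = M) (f := fun i => i + 1)]
  have h1 := enumerate_filter_map_idxEq xs 0 M
  rw [PySem.List.enumerate_eq_map_pyRange (xs := xs) (d := (0 : Int)), List.filter_map, List.map_map] at h1
  simpa [pysem, Function.comp] using h1

-- ===== VERDICT (by name: the statement is the Claim_ definition above) =====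
theorem setHighestHours_spec : Claim_equal_setHighestHours := by
  intro hours _ hpre
  match hours with
  | [] => exact absurd rfl hpre
  | h :: t =>
      unfold Spec_setHighestHours setHighestHours setHighestHours_alt
      rw [PySem.List.max?_id_cons]
      simp only
      rw [A_days (h :: t) (t.foldl max h), setHighestHoursLoop_spec]
      have hle : h ≤ t.foldl max h := (PySem.List.le_foldl_max t h).1
      by_cases h2 : h = t.foldl max h
      · simp [idxEq, ← h2]
      · simp [idxEq, h2]
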